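-- pv_equiv track=rewrite | github.com/Texnoit-com/examples-algorithms | yandex/sprint1_1/b_sleight_hand.py | sleight_hand
-- ===== SOURCE A (Python) =====
-- from collections import Counter
-- from typing import List, Tuple
--
-- def sleight_hand(line: List[str], k: int) -> int:
--     amount = Counter()
--     score: int = 0
--     for i in range(len(line)):
--         line[i]=line[i].replace('.', '')
--         amount += Counter(line[i])
--     for value in amount.values():
--         if value <= 2*k:
--             score += 1
--     return score
-- ===== SOURCE B (Python) =====
-- def sleight_hand(line, k):
--     for i in range(len(line)):
--         line[i] = line[i].replace('.', '')
--     chars = sorted(''.join(line))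
--     score = 0
--     i = 0
--     n = len(chars)
--     while i < n:
--         j = i + 1
--         while j < n and chars[j] == chars[i]:
--             j += 1
--         if j - i <= 2 * k:
--             score += 1
--         i = j
--     return score
-- ===== Notes on version B (the rewrite author's own statement) =====
-- stated objective: faster
-- what changed: Replaces the per-string Counter construction and Counter addition with concatenating all cleaned characters, sorting them once, and scanning runs of equal characters with two index pointers, counting runs of length <= 2k.
import Mathlib
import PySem

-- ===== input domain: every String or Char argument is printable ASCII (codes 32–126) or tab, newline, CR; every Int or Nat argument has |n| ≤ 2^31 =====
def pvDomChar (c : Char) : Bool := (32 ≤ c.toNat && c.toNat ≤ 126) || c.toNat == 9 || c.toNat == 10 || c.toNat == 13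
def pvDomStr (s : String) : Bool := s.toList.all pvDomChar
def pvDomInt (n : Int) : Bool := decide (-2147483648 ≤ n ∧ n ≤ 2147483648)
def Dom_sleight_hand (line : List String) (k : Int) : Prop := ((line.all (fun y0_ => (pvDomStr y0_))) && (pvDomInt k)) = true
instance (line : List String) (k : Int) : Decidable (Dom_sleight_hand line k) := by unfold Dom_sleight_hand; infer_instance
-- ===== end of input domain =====

-- B replaces the Counter-of-frequencies pass by concatenate–sort–scan-runs (same result, 'alternative'
-- objective); both programs also mutate `line` in place identically (equivalence proved for the RETURN value).

-- ===== PORT A =====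
-- for i in range(len(line)): line[i] = line[i].replace('.',''); amount += Counter(line[i])
-- (Counter += Counter(s) with only positive counts = folding s's chars into the counter dict)
def sleight_hand (line : List String) (k : Int) : Int :=
  let st :=
    (PySem.List.pyRange 0 (line.length : Int) 1).foldl
      (fun (st : List String × PySem.Dict Char Int) i =>
        let s := PySem.Str.replace (PySem.List.pyGetD st.1 i "") "." ""
        (PySem.List.pySetD st.1 i s,
         s.toList.foldl (fun d c => d.modify c 0 (· + 1)) st.2))
      (line, PySem.Dict.empty)
  st.2.values.foldl (fun score v => if v ≤ 2 * k then score + 1 else score) 0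

-- ===== PORT B =====
-- the two nested while loops of Source B: one run of equal chars per step of the recursion
def runScore (k : Int) : List Char → Int
  | [] => 0
  | c :: rest =>
      (if ((rest.takeWhile (fun d => d == c)).length : Int) + 1 ≤ 2 * k then 1 else 0)
        + runScore k (rest.dropWhile (fun d => d == c))
  termination_by l => l.length
  decreasing_by
    have := List.length_dropWhile_le (fun d => d == c) rest
    simp; omega

def sleight_hand_alt (line : List String) (k : Int) : Int :=
  let line2 :=
    (PySem.List.pyRange 0 (line.length : Int) 1).foldl
      (fun ln i => PySem.List.pySetD ln i (PySem.Str.replace (PySem.List.pyGetD ln i "") "." "")) line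
  runScore k (PySem.List.sorted (PySem.Str.join "" line2).toList (fun c => c) false)

-- ===== PRECONDITION & SPEC =====
def Spec_sleight_hand (line : List String) (k : Int) (out : Int) : Prop := out = sleight_hand_alt line k
instance (line : List String) (k : Int) (out : Int) : Decidable (Spec_sleight_hand line k out) := by unfold Spec_sleight_hand; infer_instance

-- ===== CLAIM (what is proved, stated in full; the proofs are below) =====
def Claim_equal_sleight_hand : Prop := ∀ (line : List String) (k : Int), Dom_sleight_hand line k → Spec_sleight_hand line k (sleight_hand line k)

-- ===== LEMMAS AND PROOFS =====

-- the canonical value both sides reach: number of distinct characters with total count ≤ 2k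
def pvF (l : List Char) (k : Int) : Int :=
  ((l.toFinset.filter (fun c => (l.count c : Int) ≤ 2 * k)).card : Int)

-- the index loop over `line`: after processing, the prefix is mapped and the counter has absorbed its chars
theorem loopA (rest : List String) : ∀ (pref : List String) (d : PySem.Dict Char Int),
    (PySem.List.pyRange (pref.length : Int) ((pref.length : Int) + (rest.length : Int)) 1).foldl
      (fun (st : List String × PySem.Dict Char Int) i =>
        let s := PySem.Str.replace (PySem.List.pyGetD st.1 i "") "." ""
        (PySem.List.pySetD st.1 i s,
         s.toList.foldl (fun d c => d.modify c 0 (· + 1)) st.2))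
      (pref ++ rest, d)
    = (pref ++ rest.map (fun s => PySem.Str.replace s "." ""),
       (rest.flatMap (fun s => (PySem.Str.replace s "." "").toList)).foldl
         (fun d c => d.modify c 0 (· + 1)) d) := by
  induction rest with
  | nil => intro pref d; simp
  | cons s rest ih =>
    intro pref d
    rw [PySem.List.pyRange_one_cons (by push_cast [List.length_cons]; omega)]
    rw [List.foldl_cons]
    have hget : PySem.List.pyGetD (pref ++ s :: rest) (pref.length : Int) "" = s := by
      simp [PySem.List.pyGetD_natCast, List.getD_eq_getElem?_getD]
    have hset : PySem.List.pySetD (pref ++ s :: rest) (pref.length : Int)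
        (PySem.Str.replace s "." "") = (pref ++ [PySem.Str.replace s "." ""]) ++ rest := by
      simp [PySem.List.pySetD_natCast]
    simp only [hget, hset]
    have hrange : PySem.List.pyRange ((pref.length : Int) + 1)
          ((pref.length : Int) + ((s :: rest).length : Int)) 1
        = PySem.List.pyRange (((pref ++ [PySem.Str.replace s "." ""]).length : Int))
          (((pref ++ [PySem.Str.replace s "." ""]).length : Int) + (rest.length : Int)) 1 := by
      congr 1 <;> (simp; try omega)
    rw [hrange, ih]
    simp [List.foldl_append]

-- the same index loop with only the list accumulator (B's first loop)
theorem loopB (rest : List String) : ∀ (pref : List String),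
    (PySem.List.pyRange (pref.length : Int) ((pref.length : Int) + (rest.length : Int)) 1).foldl
      (fun ln i => PySem.List.pySetD ln i (PySem.Str.replace (PySem.List.pyGetD ln i "") "." ""))
      (pref ++ rest)
    = pref ++ rest.map (fun s => PySem.Str.replace s "." "") := by
  induction rest with
  | nil => intro pref; simp
  | cons s rest ih =>
    intro pref
    rw [PySem.List.pyRange_one_cons (by push_cast [List.length_cons]; omega)]
    rw [List.foldl_cons]
    have hget : PySem.List.pyGetD (pref ++ s :: rest) (pref.length : Int) "" = s := by
      simp [PySem.List.pyGetD_natCast, List.getD_eq_getElem?_getD]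
    have hset : PySem.List.pySetD (pref ++ s :: rest) (pref.length : Int)
        (PySem.Str.replace s "." "") = (pref ++ [PySem.Str.replace s "." ""]) ++ rest := by
      simp [PySem.List.pySetD_natCast]
    simp only [hget, hset]
    have hrange : PySem.List.pyRange ((pref.length : Int) + 1)
          ((pref.length : Int) + ((s :: rest).length : Int)) 1
        = PySem.List.pyRange (((pref ++ [PySem.Str.replace s "." ""]).length : Int))
          (((pref ++ [PySem.Str.replace s "." ""]).length : Int) + (rest.length : Int)) 1 := by
      congr 1 <;> (simp; try omega)
    rw [hrange, ih]
    simp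

-- A's value as the canonical count
theorem countP_set_eq_F (l : List Char) (k : Int) :
    (((PySem.Set.ofList l).countP (fun c => decide ((l.count c : Int) ≤ 2 * k)) : Nat) : Int)
      = pvF l k := by
  unfold pvF
  congr 1
  rw [List.countP_eq_length_filter]
  have hnd : ((PySem.Set.ofList l).filter (fun c => decide ((l.count c : Int) ≤ 2 * k))).Nodup :=
    (PySem.Set.nodup_ofList l).filter _
  rw [← List.toFinset_card_of_nodup hnd]
  congr 1
  ext c
  simp [PySem.Set.mem_ofList, Finset.mem_filter]

-- B's run scan on a sorted list computes the canonical count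
theorem runScore_sorted (k : Int) : ∀ (n : Nat) (l : List Char), l.length ≤ n →
    l.Pairwise (· ≤ ·) → runScore k l = pvF l k := by
  intro n
  induction n with
  | zero =>
    intro l h _
    cases l with
    | nil => simp [runScore, pvF]
    | cons c t => simp at h
  | succ n ih =>
    intro l hlen hp
    cases l with
    | nil => simp [runScore, pvF]
    | cons c rest =>
      have hrest : rest.Pairwise (· ≤ ·) := hp.of_cons
      have hcle : ∀ x ∈ rest, c ≤ x := fun x hx => List.rel_of_pairwise_cons hp hx
      set t := rest.takeWhile (fun d => d == c) with ht
      set r := rest.dropWhile (fun d => d == c) with hr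
      have htr : t ++ r = rest := List.takeWhile_append_dropWhile
      have htc : ∀ d ∈ t, d = c := by
        intro d hd
        have := List.mem_takeWhile_imp hd
        simpa using this
      have hrp : r.Pairwise (· ≤ ·) := hrest.sublist (List.dropWhile_sublist _)
      have hcr : c ∉ r := by
        intro hc
        cases hhd : r with
        | nil => simp [hhd] at hc
        | cons d r' =>
          have hdne : ¬ (d == c) = true := by
            have := List.head?_dropWhile_not (fun d => d == c) rest
            rw [← hr, hhd] at this
            simpa using this
          have hcd : c ≤ d := hcle d (by rw [← htr, hhd]; simp)
          have hclt : c < d := lt_of_le_of_ne hcd (by simpa using fun h => hdne (by simp [h.symm]))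
          rw [hhd] at hc
          rcases List.mem_cons.mp hc with h | h
          · exact hdne (by simp [h])
          · have : d ≤ c := List.rel_of_pairwise_cons (hhd ▸ hrp) h
            exact absurd (lt_of_lt_of_le hclt this) (lt_irrefl c)
      have hcount : (c :: rest).count c = t.length + 1 := by
        rw [List.count_cons_self, ← htr, List.count_append]
        have h1 : t.count c = t.length := List.count_eq_length.mpr (fun d hd => by simp [htc d hd])
        have h2 : r.count c = 0 := List.count_eq_zero.mpr hcr
        omega
      have hcount' : ∀ d, d ≠ c → (c :: rest).count d = r.count d := by
        intro d hd
        rw [List.count_cons_of_ne (Ne.symm hd), ← htr, List.count_append]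
        have : t.count d = 0 := List.count_eq_zero.mpr (fun h => hd (htc d h))
        omega
      have hfin : (c :: rest).toFinset = insert c r.toFinset := by
        ext d
        simp only [List.toFinset_cons, Finset.mem_insert, List.mem_toFinset]
        constructor
        · rintro (h | h)
          · exact Or.inl h
          · rw [← htr, List.mem_append] at h
            rcases h with h | h
            · exact Or.inl (htc d h)
            · exact Or.inr h
        · rintro (h | h)
          · exact Or.inl h
          · exact Or.inr (by rw [← htr]; exact List.mem_append_right t h)
      have hcns : c ∉ r.toFinset := by simpa using hcr
      have hIH : runScore k r = pvF r k := by
        apply ih r _ hrp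
        have h := List.length_dropWhile_le (fun d => d == c) rest
        rw [← hr] at h
        simp at hlen
        omega
      rw [runScore, hIH]
      unfold pvF
      rw [hfin, Finset.filter_insert]
      have hcongr : (r.toFinset.filter (fun d => ((c :: rest).count d : Int) ≤ 2 * k))
          = r.toFinset.filter (fun d => (r.count d : Int) ≤ 2 * k) := by
        apply Finset.filter_congr
        intro d hd
        have hdc : d ≠ c := fun h => hcns (h ▸ hd)
        rw [hcount' d hdc]
      split_ifs with h1 h2 h2
      · rw [Finset.card_insert_of_notMem (fun hmem => hcns (Finset.mem_filter.mp hmem).1)]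
        rw [hcongr]
        push_cast; ring
      · exfalso; apply h2; rw [hcount]; push_cast at h1 ⊢; omega
      · exfalso; apply h1; rw [hcount] at h2; push_cast at h2 ⊢; omega
      · rw [hcongr]; simp
theorem intercalate_nil_flatten (parts : List (List Char)) :
    List.intercalate [] parts = parts.flatten := by
  induction parts with
  | nil => rfl
  | cons p ps ih =>
    cases ps with
    | nil => simp [List.intercalate]
    | cons q qs =>
      simp [List.intercalate, List.intersperse] at *
      simpa [List.intercalate, List.intersperse] using ih

-- pvF is invariant under permutation
theorem pvF_perm {l l' : List Char} (h : l.Perm l') (k : Int) : pvF l k = pvF l' k := by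
  unfold pvF
  congr 1
  congr 1
  ext d
  simp [Finset.mem_filter, List.mem_toFinset, h.mem_iff, h.count_eq]

theorem loopA0 (line : List String) (d : PySem.Dict Char Int) :
    (PySem.List.pyRange 0 (line.length : Int) 1).foldl
      (fun (st : List String × PySem.Dict Char Int) i =>
        let s := PySem.Str.replace (PySem.List.pyGetD st.1 i "") "." ""
        (PySem.List.pySetD st.1 i s,
         s.toList.foldl (fun d c => d.modify c 0 (· + 1)) st.2))
      (line, d)
    = (line.map (fun s => PySem.Str.replace s "." ""),
       (line.flatMap (fun s => (PySem.Str.replace s "." "").toList)).foldl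
         (fun d c => d.modify c 0 (· + 1)) d) := by
  have h := loopA line [] d
  simpa using h

theorem sleight_hand_eq (line : List String) (k : Int) :
    sleight_hand line k
      = pvF (line.flatMap (fun s => (PySem.Str.replace s "." "").toList)) k := by
  show (((PySem.List.pyRange 0 (line.length : Int) 1).foldl
      (fun (st : List String × PySem.Dict Char Int) i =>
        let s := PySem.Str.replace (PySem.List.pyGetD st.1 i "") "." ""
        (PySem.List.pySetD st.1 i s,
         s.toList.foldl (fun d c => d.modify c 0 (· + 1)) st.2))
      (line, PySem.Dict.empty)).2.values.foldl
      (fun score v => if v ≤ 2 * k then score + 1 else score) 0) = _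
  rw [loopA0]
  simp only []
  rw [← PySem.Dict.counter_eq_foldl]
  have hv : (PySem.Dict.counter (line.flatMap (fun s => (PySem.Str.replace s "." "").toList))).values
      = (PySem.Set.ofList (line.flatMap (fun s => (PySem.Str.replace s "." "").toList))).map
          (fun c => ((line.flatMap (fun s => (PySem.Str.replace s "." "").toList)).count c : Int)) := by
    show (PySem.Dict.counter _).items.map (·.2) = _
    rw [PySem.Dict.items_counter]
    simp [List.map_map, Function.comp]
  rw [hv, PySem.List.foldl_ite_add_one (p := fun v => v ≤ 2 * k)]
  rw [List.countP_map]
  rw [← countP_set_eq_F _ k]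
  rw [zero_add]
  rfl

theorem sleight_hand_alt_eq (line : List String) (k : Int) :
    sleight_hand_alt line k
      = pvF (line.flatMap (fun s => (PySem.Str.replace s "." "").toList)) k := by
  show runScore k (PySem.List.sorted (PySem.Str.join ""
      ((PySem.List.pyRange 0 (line.length : Int) 1).foldl
        (fun ln i => PySem.List.pySetD ln i (PySem.Str.replace (PySem.List.pyGetD ln i "") "." "")) line)).toList
      (fun c => c) false) = _
  have hB : (PySem.List.pyRange 0 (line.length : Int) 1).foldl
      (fun ln i => PySem.List.pySetD ln i (PySem.Str.replace (PySem.List.pyGetD ln i "") "." "")) line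
      = line.map (fun s => PySem.Str.replace s "." "") := by
    have h := loopB line []
    simpa using h
  rw [hB]
  have hjoin : (PySem.Str.join "" (line.map (fun s => PySem.Str.replace s "." ""))).toList
      = line.flatMap (fun s => (PySem.Str.replace s "." "").toList) := by
    rw [PySem.Str.toList_join]
    show PySem.Chars.join [] _ = _
    unfold PySem.Chars.join
    rw [intercalate_nil_flatten]
    simp [List.flatMap_def, List.map_map, Function.comp_def]
  rw [hjoin]
  set cs := line.flatMap (fun s => (PySem.Str.replace s "." "").toList) with hcs
  have hperm : (PySem.List.sorted cs (fun c => c) false).Perm cs := PySem.List.sorted_perm cs _ _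
  rw [runScore_sorted k (PySem.List.sorted cs (fun c => c) false).length _ le_rfl
        (by simpa using PySem.List.sorted_pairwise cs (fun c => c))]
  exact pvF_perm hperm k

-- ===== VERDICT (by name: the statement is the Claim_ definition above) =====
theorem sleight_hand_spec : Claim_equal_sleight_hand := by
  intro line k _
  unfold Spec_sleight_hand
  rw [sleight_hand_eq, sleight_hand_alt_eq]
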